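-- pv_equiv track=rewrite | github.com/Senzo13/JoyBoy | core/backends/terminal_intent.py | _consecutive_passive_tools
-- ===== SOURCE A (Python) =====
-- from typing import Dict, List, Optional
--
-- def _consecutive_passive_tools(executed_tools: List[Dict]) -> int:
--     passive_tools = {"list_files", "read_file", "glob", "search", "tool_search", "write_todos", "think"}
--     count = 0
--     for item in reversed(executed_tools or []):
--         tool = str(item.get("tool") or "").strip()
--         if not tool:
--             continue
--         if tool not in passive_tools:
--             break
--         count += 1
--     return count
-- ===== SOURCE B (Python) =====
-- from typing import Dict, List, Optional
--
-- def _consecutive_passive_tools(executed_tools: List[Dict]) -> int: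
--     passive_tools = {"list_files", "read_file", "glob", "search", "tool_search", "write_todos", "think"}
--     names = [t for t in (str(item.get("tool") or "").strip() for item in (executed_tools or [])) if t]
--     last_bad = -1
--     for i, t in enumerate(names):
--         if t not in passive_tools:
--             last_bad = i
--     return len(names) - last_bad - 1
-- ===== Notes on version B (the rewrite author's own statement) =====
-- stated objective: alternative
-- what changed: B works in stages: it first extracts the list of cleaned non-blank tool names, then scans forward recording the index of the last non-passive name, and returns len(names) - last_bad - 1 arithmetically, instead of A's backward scan with continue/break.
import Mathlib
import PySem

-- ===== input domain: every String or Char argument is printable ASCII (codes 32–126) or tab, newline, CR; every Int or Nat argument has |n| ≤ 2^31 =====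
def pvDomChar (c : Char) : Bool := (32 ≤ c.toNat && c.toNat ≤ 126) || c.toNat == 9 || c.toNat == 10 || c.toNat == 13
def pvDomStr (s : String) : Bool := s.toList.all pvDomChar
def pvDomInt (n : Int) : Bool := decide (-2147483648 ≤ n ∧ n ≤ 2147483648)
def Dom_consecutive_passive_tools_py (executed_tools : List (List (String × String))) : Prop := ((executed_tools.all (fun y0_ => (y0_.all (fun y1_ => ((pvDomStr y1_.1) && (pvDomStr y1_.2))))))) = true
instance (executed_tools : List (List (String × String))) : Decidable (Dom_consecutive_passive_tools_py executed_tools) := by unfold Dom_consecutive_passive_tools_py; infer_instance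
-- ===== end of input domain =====

-- B replaces A's backward scan-with-break by staged passes: extract cleaned non-blank names,
-- record the index of the last non-passive one, return length - last_bad - 1. Return value only.

def pvPassiveTools : List String :=
  ["list_files", "read_file", "glob", "search", "tool_search", "write_todos", "think"]

-- ===== PORT A =====
-- tool = str(item.get("tool") or "").strip()  (first-match assoc lookup, default/falsy → "")
def pvToolName (item : List (String × String)) : String :=
  PySem.Str.strip ((item.lookup "tool").getD "")

-- the for-loop over reversed(executed_tools) with continue/break, as structural recursion on the reversed list
def pvGoA : List (List (String × String)) → Int
  | [] => 0
  | item :: rest =>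
    let tool := pvToolName item
    if tool = "" then pvGoA rest
    else if ¬ (tool ∈ pvPassiveTools) then 0   -- break
    else 1 + pvGoA rest

def consecutive_passive_tools_py (executed_tools : List (List (String × String))) : Int :=
  pvGoA executed_tools.reverse

-- ===== PORT B =====
-- names = [t for t in (str(item.get("tool") or "").strip() for item in executed_tools) if t]
def pvNamesB (executed_tools : List (List (String × String))) : List String :=
  (executed_tools.map (fun item => PySem.Str.strip ((item.lookup "tool").getD ""))).filter
    (fun t => t ≠ "")

-- for i, t in enumerate(names): if t not in passive: last_bad = i
def pvLastBad (names : List String) : Int :=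
  names.zipIdx.foldl (fun acc ti => if ti.1 ∈ pvPassiveTools then acc else (ti.2 : Int)) (-1)

def consecutive_passive_tools_py_alt (executed_tools : List (List (String × String))) : Int :=
  let names := pvNamesB executed_tools
  (names.length : Int) - pvLastBad names - 1

-- ===== PRECONDITION & SPEC =====
def Spec_consecutive_passive_tools_py (executed_tools : List (List (String × String))) (out : Int) : Prop := out = consecutive_passive_tools_py_alt executed_tools
instance (executed_tools : List (List (String × String))) (out : Int) : Decidable (Spec_consecutive_passive_tools_py executed_tools out) := by unfold Spec_consecutive_passive_tools_py; infer_instance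

-- ===== CLAIM (what is proved, stated in full; the proofs are below) =====
def Claim_equal_consecutive_passive_tools_py : Prop := ∀ (executed_tools : List (List (String × String))), Dom_consecutive_passive_tools_py executed_tools → Spec_consecutive_passive_tools_py executed_tools (consecutive_passive_tools_py executed_tools)

-- ===== LEMMAS AND PROOFS =====

-- reference function: length of the leading passive run of a (reversed, cleaned) name list
def pvRun : List String → Int
  | [] => 0
  | t :: r => if t ∈ pvPassiveTools then 1 + pvRun r else 0

theorem pvGoA_eq_run (m : List (List (String × String))) :
    pvGoA m = pvRun ((m.map pvToolName).filter (fun t => t ≠ "")) := by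
  induction m with
  | nil => rfl
  | cons item rest ih =>
    by_cases hb : pvToolName item = ""
    · simp [pvGoA, hb, ih]
    · by_cases hp : pvToolName item ∈ pvPassiveTools
      · simp [pvGoA, pvRun, hb, hp, ih]
      · simp [pvGoA, pvRun, hb, hp]

theorem pvLastBad_eq_run (names : List String) :
    (names.length : Int) - pvLastBad names - 1 = pvRun names.reverse := by
  induction names using List.reverseRecOn with
  | nil => simp [pvLastBad, pvRun]
  | append_singleton l x ih =>
    have hz : (l ++ [x]).zipIdx = l.zipIdx ++ [(x, l.length)] := by
      simp [List.zipIdx_append]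
    unfold pvLastBad
    rw [hz, List.foldl_append]
    simp only [List.foldl_cons, List.foldl_nil, List.reverse_append, List.reverse_singleton,
      List.singleton_append, List.length_append, List.length_singleton]
    by_cases hp : x ∈ pvPassiveTools
    · simp only [pvRun, hp, if_pos]
      rw [← ih]
      unfold pvLastBad
      push_cast
      ring
    · simp only [pvRun, hp, if_neg, not_false_eq_true]
      push_cast
      ring

theorem consecutive_passive_tools_py_spec : Claim_equal_consecutive_passive_tools_py := by
  intro l _
  show consecutive_passive_tools_py l = consecutive_passive_tools_py_alt l
  unfold consecutive_passive_tools_py consecutive_passive_tools_py_alt pvNamesB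
  rw [pvGoA_eq_run, pvLastBad_eq_run]
  simp only [List.map_reverse, List.filter_reverse]
  rfl
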